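-- pv_equiv track=rewrite | github.com/czbiohub-sf/zebrahub-multiome-analysis | notebooks/Fig_peak_umap/eda/EDA_step7_peak_umap_stats.py | create_biologically_ordered_celltypes
-- ===== SOURCE A (Python) =====
-- def create_biologically_ordered_celltypes(celltypes):
--     """
--     Create a biologically meaningful ordering of celltypes, grouping related cell types together.
--
--     Parameters:
--     -----------
--     celltypes : list
--         List of cell type names to be ordered
--
--     Returns:
--     --------
--     ordered_celltypes : list
--         Ordered list of cell types
--     """
--     # Define groups of related cell types
--     cell_type_groups = {
--         # Neural lineage
--         'neural': [
--             'neural', 'neurons', 'neural_crest', 'neural_plate', 'neural_floor_plate',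
--             'neural_optic', 'neural_telencephalon', 'neural_posterior', 'optic_cup',
--             'hindbrain', 'midbrain_hindbrain_boundary', 'differentiating_neurons',
--             'enteric_neurons'
--         ],
--
--         # Mesoderm/hematopoietic lineage
--         'mesoderm_hematopoietic': [
--             'hemangioblasts', 'hematopoietic_vasculature', 'somites', 'heart_myocardium',
--             'heart', 'lateral_plate_mesoderm', 'mesoderm', 'muscle', 'fast_muscle',
--             '5somites', '10somites', '15somites', '20somites', '30somites', '0somites'
--         ],
--
--         # Endodermal lineage
--         'endoderm': [
--             'endoderm', 'endocrine_pancreas', 'pancreas', 'pronephros'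
--         ],
--
--         # Ectodermal/epidermal lineage
--         'ectoderm': [
--             'epidermis', 'hatching_gland', 'ectoderm'
--         ],
--
--         # Primordial/stem cell lineage
--         'primordial': [
--             'primordial_germ_cells', 'PSM', 'notochord', 'tail_bud', 'floor_plate'
--         ],
--
--         # Other/miscellaneous
--         'other': [
--             'NMPs', 'spinal_cord', 'pharyngeal_arches', 'gene_body_overlaps'
--         ]
--     }
--
--     # Create a flattened list of ordered celltypes across all groups
--     ordered_groups = ['neural', 'mesoderm_hematopoietic', 'endoderm', 'ectoderm', 'primordial', 'other']
--     ordered_celltypes = []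
--
--     # Track which celltypes have been added
--     added_celltypes = set()
--
--     # First pass: Add celltypes that match our predefined groups
--     for group in ordered_groups:
--         for celltype_pattern in cell_type_groups[group]:
--             # Find all matching celltypes that contain this pattern
--             matching_celltypes = [ct for ct in celltypes
--                                 if celltype_pattern in ct and ct not in added_celltypes]
--
--             # Sort matching celltypes alphabetically for consistent ordering
--             matching_celltypes.sort()
--
--             # Add them to the ordered list
--             ordered_celltypes.extend(matching_celltypes)
--             added_celltypes.update(matching_celltypes)
--
--     # Second pass: Add any remaining celltypes that weren't matched
--     remaining_celltypes = [ct for ct in celltypes if ct not in added_celltypes]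
--     ordered_celltypes.extend(sorted(remaining_celltypes))
--
--     return ordered_celltypes
-- ===== SOURCE B (Python) =====
-- # Flattened group patterns in A's group-then-pattern order.
-- _PATTERNS = [
--     # neural
--     'neural', 'neurons', 'neural_crest', 'neural_plate', 'neural_floor_plate',
--     'neural_optic', 'neural_telencephalon', 'neural_posterior', 'optic_cup',
--     'hindbrain', 'midbrain_hindbrain_boundary', 'differentiating_neurons',
--     'enteric_neurons',
--     # mesoderm_hematopoietic
--     'hemangioblasts', 'hematopoietic_vasculature', 'somites', 'heart_myocardium',
--     'heart', 'lateral_plate_mesoderm', 'mesoderm', 'muscle', 'fast_muscle',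
--     '5somites', '10somites', '15somites', '20somites', '30somites', '0somites',
--     # endoderm
--     'endoderm', 'endocrine_pancreas', 'pancreas', 'pronephros',
--     # ectoderm
--     'epidermis', 'hatching_gland', 'ectoderm',
--     # primordial
--     'primordial_germ_cells', 'PSM', 'notochord', 'tail_bud', 'floor_plate',
--     # other
--     'NMPs', 'spinal_cord', 'pharyngeal_arches', 'gene_body_overlaps',
-- ]
--
--
-- def create_biologically_ordered_celltypes(celltypes):
--     """Rank each celltype by the first flattened pattern it contains (len(_PATTERNS)
--     if none), then sort once by (rank, name)."""
--     def rank(ct):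
--         for i, p in enumerate(_PATTERNS):
--             if p in ct:
--                 return i
--         return len(_PATTERNS)
--     return sorted(celltypes, key=lambda ct: (rank(ct), ct))
-- ===== Notes on version B (the rewrite author's own statement) =====
-- stated objective: simpler
-- what changed: Replaces the nested group/pattern loops with an added-set and per-pattern filtering by a single assignment of a rank (index of the first matching pattern in the flattened pattern list, or its length if none) followed by one sort of the whole input by (rank, name).
import Mathlib
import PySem

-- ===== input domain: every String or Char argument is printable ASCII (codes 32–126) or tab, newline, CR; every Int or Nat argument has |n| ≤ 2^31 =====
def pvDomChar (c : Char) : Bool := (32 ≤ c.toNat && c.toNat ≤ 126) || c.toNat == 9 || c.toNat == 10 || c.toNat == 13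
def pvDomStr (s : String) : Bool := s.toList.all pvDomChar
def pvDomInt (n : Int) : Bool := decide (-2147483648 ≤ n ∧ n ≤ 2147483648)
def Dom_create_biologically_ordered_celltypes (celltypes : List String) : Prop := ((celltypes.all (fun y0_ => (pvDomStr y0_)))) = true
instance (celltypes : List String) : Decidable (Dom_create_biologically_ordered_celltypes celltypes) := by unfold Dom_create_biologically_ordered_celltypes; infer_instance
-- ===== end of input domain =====

-- B replaces the nested add-and-track loops of A by one rank assignment (index of the
-- first matching pattern in the flattened pattern list) and a single sort by (rank, name):
-- simpler decomposition, same exact result.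

-- ===== PORT A =====
-- the dict literal cell_type_groups, in insertion order
def pvCellTypeGroups : PySem.Dict String (List String) := PySem.Dict.mk
  [ ("neural",
      ["neural", "neurons", "neural_crest", "neural_plate", "neural_floor_plate",
       "neural_optic", "neural_telencephalon", "neural_posterior", "optic_cup",
       "hindbrain", "midbrain_hindbrain_boundary", "differentiating_neurons",
       "enteric_neurons"]),
    ("mesoderm_hematopoietic",
      ["hemangioblasts", "hematopoietic_vasculature", "somites", "heart_myocardium",
       "heart", "lateral_plate_mesoderm", "mesoderm", "muscle", "fast_muscle",
       "5somites", "10somites", "15somites", "20somites", "30somites", "0somites"]),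
    ("endoderm",
      ["endoderm", "endocrine_pancreas", "pancreas", "pronephros"]),
    ("ectoderm",
      ["epidermis", "hatching_gland", "ectoderm"]),
    ("primordial",
      ["primordial_germ_cells", "PSM", "notochord", "tail_bud", "floor_plate"]),
    ("other",
      ["NMPs", "spinal_cord", "pharyngeal_arches", "gene_body_overlaps"]) ]

-- body of the inner 'for celltype_pattern in cell_type_groups[group]' loop:
-- filter the unmatched celltypes containing the pattern, sort them, extend, update the set
def pvStepA (celltypes : List String) (st : List String × PySem.Set String) (pat : String) :
    List String × PySem.Set String :=
  let matching := PySem.List.sorted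
      (celltypes.filter (fun ct => PySem.Str.isIn pat ct && !(PySem.Set.contains st.2 ct)))
      (fun x => x) false
  (st.1 ++ matching, PySem.Set.update st.2 matching)

def create_biologically_ordered_celltypes (celltypes : List String) : List String :=
  let ordered_groups := ["neural", "mesoderm_hematopoietic", "endoderm", "ectoderm", "primordial", "other"]
  let res := ordered_groups.foldl
      (fun st group => (PySem.Dict.getD pvCellTypeGroups group []).foldl (pvStepA celltypes) st)
      ([], PySem.Set.empty)
  let remaining := celltypes.filter (fun ct => !(PySem.Set.contains res.2 ct))
  res.1 ++ PySem.List.sorted remaining (fun x => x) false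

-- ===== PORT B =====
-- the six groups flattened, in group-then-pattern order
def pvPatterns : List String :=
  ["neural", "neurons", "neural_crest", "neural_plate", "neural_floor_plate",
   "neural_optic", "neural_telencephalon", "neural_posterior", "optic_cup",
   "hindbrain", "midbrain_hindbrain_boundary", "differentiating_neurons",
   "enteric_neurons",
   "hemangioblasts", "hematopoietic_vasculature", "somites", "heart_myocardium",
   "heart", "lateral_plate_mesoderm", "mesoderm", "muscle", "fast_muscle",
   "5somites", "10somites", "15somites", "20somites", "30somites", "0somites",
   "endoderm", "endocrine_pancreas", "pancreas", "pronephros",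
   "epidermis", "hatching_gland", "ectoderm",
   "primordial_germ_cells", "PSM", "notochord", "tail_bud", "floor_plate",
   "NMPs", "spinal_cord", "pharyngeal_arches", "gene_body_overlaps"]

-- rank(ct): index of the first pattern contained in ct, len(pvPatterns) if none
def pvRank (ct : String) : Nat := pvPatterns.findIdx (fun p => PySem.Str.isIn p ct)

def create_biologically_ordered_celltypes_alt (celltypes : List String) : List String :=
  PySem.List.sorted2 celltypes (fun ct => pvRank ct) (fun ct => ct) false

-- ===== PRECONDITION & SPEC =====
def Spec_create_biologically_ordered_celltypes (celltypes : List String) (out : List String) : Prop := out = create_biologically_ordered_celltypes_alt celltypes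
instance (celltypes : List String) (out : List String) : Decidable (Spec_create_biologically_ordered_celltypes celltypes out) := by unfold Spec_create_biologically_ordered_celltypes; infer_instance

-- ===== CLAIM (what is proved, stated in full; the proofs are below) =====
def Claim_equal_create_biologically_ordered_celltypes : Prop := ∀ (celltypes : List String), Dom_create_biologically_ordered_celltypes celltypes → Spec_create_biologically_ordered_celltypes celltypes (create_biologically_ordered_celltypes celltypes)

-- ===== LEMMAS AND PROOFS =====

-- the lexicographic (rank, name) key both results are ordered by
def pvKey (ct : String) : Lex (Nat × String) := toLex (pvRank ct, ct)

lemma pvKey_injective : Function.Injective pvKey := by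
  intro a b h
  exact congrArg (fun x => (ofLex x).2) h

lemma alt_eq_sorted (celltypes : List String) :
    create_biologically_ordered_celltypes_alt celltypes
      = PySem.List.sorted celltypes pvKey false := by
  have h : (fun a b : String =>
        decide (pvRank a < pvRank b) || (!decide (pvRank b < pvRank a) && decide (a < b)))
      = (fun a b : String => decide (pvKey a < pvKey b)) := by
    funext a b
    by_cases h1 : pvRank a < pvRank b
    · simp [pvKey, Prod.Lex.lt_iff, h1]
    · by_cases h2 : pvRank b < pvRank a
      · simp [pvKey, Prod.Lex.lt_iff, h1, h2, ne_of_gt h2]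
      · have he : pvRank a = pvRank b := Nat.le_antisymm (Nat.le_of_not_lt h2) (Nat.le_of_not_lt h1)
        simp [pvKey, Prod.Lex.lt_iff, he]
  show List.foldl
      (fun acc x => PySem.List.insertBy
        (fun a b : String =>
          decide (pvRank a < pvRank b) || (!decide (pvRank b < pvRank a) && decide (a < b)))
        x acc) [] celltypes
    = List.foldl (fun acc x => PySem.List.insertBy (fun a b : String => decide (pvKey a < pvKey b)) x acc) [] celltypes
  rw [h]

-- splitting a filter along a second predicate, up to permutation
lemma filter_split_perm {α : Type} (l : List α) (p q : α → Bool) :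
    (l.filter (fun x => p x && q x) ++ l.filter (fun x => p x && !q x)).Perm (l.filter p) := by
  have h1 : (l.filter p).filter q = l.filter (fun x => p x && q x) := by
    rw [List.filter_filter]
    exact List.filter_congr (by intro x _; exact Bool.and_comm _ _)
  have h2 : (l.filter p).filter (fun x => !q x) = l.filter (fun x => p x && !q x) := by
    rw [List.filter_filter]
    exact List.filter_congr (by intro x _; exact Bool.and_comm _ _)
  rw [← h1, ← h2]
  exact List.filter_append_perm _ _

-- rank of a celltype whose first match is the pattern at position pre.length
lemma rank_of_first_match {pre suf : List String} {q ct : String}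
    (hP : pvPatterns = pre ++ q :: suf)
    (hpre : ∀ p ∈ pre, PySem.Str.isIn p ct = false)
    (hq : PySem.Str.isIn q ct = true) : pvRank ct = pre.length := by
  unfold pvRank
  rw [hP, List.findIdx_append]
  have hlen : List.findIdx (fun p => PySem.Str.isIn p ct) pre = pre.length :=
    List.findIdx_eq_length.mpr hpre
  have hq' : PySem.Chars.isIn q.toList ct.toList = true := by simpa using hq
  rw [hlen]
  simp [List.findIdx_cons, hq']

-- rank of an unmatched celltype is the number of patterns
lemma rank_of_no_match {ct : String}
    (h : ∀ p ∈ pvPatterns, PySem.Str.isIn p ct = false) : pvRank ct = pvPatterns.length :=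
  List.findIdx_eq_length.mpr h

-- elements with first match at pre.length (pre.length patterns scanned, none in pre match, q does)
lemma rank_facts_of_mem_filter {pre suf : List String} {q ct : String}
    (hP : pvPatterns = pre ++ q :: suf)
    (hq : PySem.Str.isIn q ct = true)
    (hpre : pre.any (fun p => PySem.Str.isIn p ct) = false) : pvRank ct = pre.length := by
  refine rank_of_first_match hP ?_ hq
  intro p hp
  have := List.any_eq_false.mp hpre p hp
  simpa using this

-- the main loop invariant for A's pattern loop
lemma loopA (celltypes : List String) :
    ∀ (suf pre ord : List String) (add : PySem.Set String),
    pvPatterns = pre ++ suf →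
    (∀ ct, PySem.Set.contains add ct
        = (celltypes.contains ct && pre.any (fun p => PySem.Str.isIn p ct))) →
    (∃ tail,
        (suf.foldl (pvStepA celltypes) (ord, add)).1 = ord ++ tail
      ∧ tail.Perm (celltypes.filter (fun ct =>
            !pre.any (fun p => PySem.Str.isIn p ct) && suf.any (fun p => PySem.Str.isIn p ct)))
      ∧ tail.Pairwise (fun a b => pvKey a ≤ pvKey b)
      ∧ (∀ ct ∈ tail, pre.length ≤ pvRank ct ∧ pvRank ct < pvPatterns.length))
    ∧ (∀ ct, PySem.Set.contains (suf.foldl (pvStepA celltypes) (ord, add)).2 ct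
        = (celltypes.contains ct && (pre ++ suf).any (fun p => PySem.Str.isIn p ct))) := by
  intro suf
  induction suf with
  | nil =>
    intro pre ord add hP hadd
    refine ⟨⟨[], by simp, ?_, by simp, by simp⟩, by simpa using hadd⟩
    simp
  | cons q suf ih =>
    intro pre ord add hP hadd
    -- the filter in the first step, rewritten without the added-set
    have hm : celltypes.filter (fun ct => PySem.Str.isIn q ct && !(PySem.Set.contains add ct))
        = celltypes.filter (fun ct => PySem.Str.isIn q ct
            && !pre.any (fun p => PySem.Str.isIn p ct)) := by
      refine List.filter_congr ?_
      intro ct hct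
      have hco : celltypes.contains ct = true := by
        simpa [List.contains_eq_mem] using hct
      rw [hadd ct, hco, Bool.true_and]
    set M := PySem.List.sorted
        (celltypes.filter (fun ct => PySem.Str.isIn q ct
            && !pre.any (fun p => PySem.Str.isIn p ct))) (fun x => x) false with hM
    have hstep : pvStepA celltypes (ord, add) q = (ord ++ M, PySem.Set.update add M) := by
      simp only [pvStepA, hm, hM]
    have hMmem : ∀ ct, ct ∈ M ↔ (ct ∈ celltypes ∧ PySem.Str.isIn q ct = true
        ∧ pre.any (fun p => PySem.Str.isIn p ct) = false) := by
      intro ct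
      simp [hM, PySem.List.mem_sorted, List.mem_filter]
    -- invariant for the updated set
    have hadd' : ∀ ct, PySem.Set.contains (PySem.Set.update add M) ct
        = (celltypes.contains ct && (pre ++ [q]).any (fun p => PySem.Str.isIn p ct)) := by
      intro ct
      have hold := hadd ct
      rw [PySem.Set.contains_eq_decide] at hold ⊢
      rw [Bool.eq_iff_iff] at hold ⊢
      simp only [decide_eq_true_eq, List.contains_eq_mem, Bool.and_eq_true,
        List.any_append, List.any_cons, List.any_nil, Bool.or_eq_true,
        PySem.Set.mem_update, decide_eq_true_eq] at hold ⊢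
      rw [hMmem ct]
      constructor
      · rintro (h | ⟨h1, h2, h3⟩)
        · rcases hold.mp h with ⟨h1, h2⟩
          exact ⟨h1, Or.inl h2⟩
        · exact ⟨h1, Or.inr (Or.inl h2)⟩
      · rintro ⟨h1, h2 | h2 | h2⟩
        · exact Or.inl (hold.mpr ⟨h1, h2⟩)
        · by_cases h3 : pre.any (fun p => PySem.Str.isIn p ct) = true
          · exact Or.inl (hold.mpr ⟨h1, h3⟩)
          · exact Or.inr ⟨h1, h2, Bool.eq_false_iff.mpr h3⟩
        · exact absurd h2 (by simp)
    have hP' : pvPatterns = (pre ++ [q]) ++ suf := by simpa [List.append_assoc] using hP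
    obtain ⟨⟨tail', h1, h2, h3, h4⟩, h5⟩ := ih (pre ++ [q]) (ord ++ M) (PySem.Set.update add M) hP' hadd'
    -- ranks of the elements of M
    have hMrank : ∀ ct ∈ M, pvRank ct = pre.length := by
      intro ct hct
      rcases (hMmem ct).mp hct with ⟨_, hq, hpre⟩
      exact rank_facts_of_mem_filter hP hq hpre
    have hlenP : pre.length < pvPatterns.length := by
      rw [hP]; simp
    constructor
    · refine ⟨M ++ tail', ?_, ?_, ?_, ?_⟩
      · show ((q :: suf).foldl (pvStepA celltypes) (ord, add)).1 = _
        rw [List.foldl_cons, hstep, h1, List.append_assoc]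
      · -- permutation with the bucket split
        have hsplit := filter_split_perm celltypes
          (fun ct => !pre.any (fun p => PySem.Str.isIn p ct)
              && (q :: suf).any (fun p => PySem.Str.isIn p ct))
          (fun ct => PySem.Str.isIn q ct)
        have e1 : celltypes.filter (fun ct =>
              (!pre.any (fun p => PySem.Str.isIn p ct)
                && (q :: suf).any (fun p => PySem.Str.isIn p ct)) && PySem.Str.isIn q ct)
            = celltypes.filter (fun ct => PySem.Str.isIn q ct
                && !pre.any (fun p => PySem.Str.isIn p ct)) := by
          refine List.filter_congr ?_
          intro ct _
          simp only [List.any_cons]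
          generalize pre.any (fun p => PySem.Str.isIn p ct) = a
          generalize PySem.Str.isIn q ct = b
          generalize suf.any (fun p => PySem.Str.isIn p ct) = c
          cases a <;> cases b <;> cases c <;> rfl
        have e2 : celltypes.filter (fun ct =>
              (!pre.any (fun p => PySem.Str.isIn p ct)
                && (q :: suf).any (fun p => PySem.Str.isIn p ct)) && !PySem.Str.isIn q ct)
            = celltypes.filter (fun ct => !(pre ++ [q]).any (fun p => PySem.Str.isIn p ct)
                && suf.any (fun p => PySem.Str.isIn p ct)) := by
          refine List.filter_congr ?_
          intro ct _
          simp only [List.any_cons, List.any_append, List.any_nil]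
          generalize pre.any (fun p => PySem.Str.isIn p ct) = a
          generalize PySem.Str.isIn q ct = b
          generalize suf.any (fun p => PySem.Str.isIn p ct) = c
          cases a <;> cases b <;> cases c <;> rfl
        rw [e1, e2] at hsplit
        exact List.Perm.trans (List.Perm.append (PySem.List.sorted_perm _ _ _) h2) hsplit
      · -- pairwise on M ++ tail'
        rw [List.pairwise_append]
        refine ⟨?_, h3, ?_⟩
        · have hs := PySem.List.sorted_pairwise
            (celltypes.filter (fun ct => PySem.Str.isIn q ct
              && !pre.any (fun p => PySem.Str.isIn p ct))) (fun x => x)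
          refine hs.imp_of_mem ?_
          intro a b ha hb hab
          have hra := hMrank a ha
          have hrb := hMrank b hb
          rw [Prod.Lex.le_iff]
          exact Or.inr ⟨by simp [pvKey, hra, hrb], by simpa [pvKey] using hab⟩
        · intro a ha b hb
          have hra := hMrank a ha
          have hrb := (h4 b hb).1
          rw [Prod.Lex.le_iff]
          refine Or.inl ?_
          simp only [pvKey, ofLex_toLex]
          have : pre.length + 1 ≤ pvRank b := by simpa using hrb
          omega
      · intro ct hct
        rcases List.mem_append.mp hct with h | h
        · exact ⟨le_of_eq (hMrank ct h).symm, (hMrank ct h) ▸ hlenP⟩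
        · have := h4 ct h
          constructor
          · have : (pre ++ [q]).length ≤ pvRank ct := this.1
            simpa using Nat.le_of_succ_le (by simpa using this)
          · exact this.2
    · intro ct
      have := h5 ct
      rw [List.foldl_cons, hstep]
      simpa [List.append_assoc] using this

-- the six group lists, as stored in the dict
lemma getD_g1 : PySem.Dict.getD pvCellTypeGroups "neural" []
    = ["neural", "neurons", "neural_crest", "neural_plate", "neural_floor_plate",
       "neural_optic", "neural_telencephalon", "neural_posterior", "optic_cup",
       "hindbrain", "midbrain_hindbrain_boundary", "differentiating_neurons",
       "enteric_neurons"] := rfl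
lemma getD_g2 : PySem.Dict.getD pvCellTypeGroups "mesoderm_hematopoietic" []
    = ["hemangioblasts", "hematopoietic_vasculature", "somites", "heart_myocardium",
       "heart", "lateral_plate_mesoderm", "mesoderm", "muscle", "fast_muscle",
       "5somites", "10somites", "15somites", "20somites", "30somites", "0somites"] := rfl
lemma getD_g3 : PySem.Dict.getD pvCellTypeGroups "endoderm" []
    = ["endoderm", "endocrine_pancreas", "pancreas", "pronephros"] := rfl
lemma getD_g4 : PySem.Dict.getD pvCellTypeGroups "ectoderm" []
    = ["epidermis", "hatching_gland", "ectoderm"] := rfl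
lemma getD_g5 : PySem.Dict.getD pvCellTypeGroups "primordial" []
    = ["primordial_germ_cells", "PSM", "notochord", "tail_bud", "floor_plate"] := rfl
lemma getD_g6 : PySem.Dict.getD pvCellTypeGroups "other" []
    = ["NMPs", "spinal_cord", "pharyngeal_arches", "gene_body_overlaps"] := rfl

-- pvPatterns is the concatenation of the six group lists
lemma pvPatterns_eq : pvPatterns
    = ["neural", "neurons", "neural_crest", "neural_plate", "neural_floor_plate",
       "neural_optic", "neural_telencephalon", "neural_posterior", "optic_cup",
       "hindbrain", "midbrain_hindbrain_boundary", "differentiating_neurons",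
       "enteric_neurons"]
      ++ (["hemangioblasts", "hematopoietic_vasculature", "somites", "heart_myocardium",
       "heart", "lateral_plate_mesoderm", "mesoderm", "muscle", "fast_muscle",
       "5somites", "10somites", "15somites", "20somites", "30somites", "0somites"]
      ++ (["endoderm", "endocrine_pancreas", "pancreas", "pronephros"]
      ++ (["epidermis", "hatching_gland", "ectoderm"]
      ++ (["primordial_germ_cells", "PSM", "notochord", "tail_bud", "floor_plate"]
      ++ ["NMPs", "spinal_cord", "pharyngeal_arches", "gene_body_overlaps"])))) := rfl

-- A's double group loop, flattened to a single fold over the flattened pattern list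
lemma A_flat (celltypes : List String) :
    create_biologically_ordered_celltypes celltypes
      = (pvPatterns.foldl (pvStepA celltypes) ([], PySem.Set.empty)).1
        ++ PySem.List.sorted
            (celltypes.filter (fun ct =>
              !(PySem.Set.contains (pvPatterns.foldl (pvStepA celltypes) ([], PySem.Set.empty)).2 ct)))
            (fun x => x) false := by
  rw [pvPatterns_eq]
  unfold create_biologically_ordered_celltypes
  simp only [List.foldl_cons, List.foldl_nil, List.foldl_append,
    getD_g1, getD_g2, getD_g3, getD_g4, getD_g5, getD_g6]

-- ===== VERDICT (by name: the statement is the Claim_ definition above) =====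
theorem create_biologically_ordered_celltypes_spec : Claim_equal_create_biologically_ordered_celltypes := by
  intro celltypes _
  unfold Spec_create_biologically_ordered_celltypes
  obtain ⟨⟨tail, h1, h2, h3, h4⟩, h5⟩ := loopA celltypes pvPatterns [] []
    PySem.Set.empty (by simp) (by intro ct; simp [PySem.Set.empty])
  rw [A_flat, h1, List.nil_append]
  -- the remaining celltypes are exactly those matching no pattern
  have hrem : celltypes.filter (fun ct =>
        !(PySem.Set.contains (pvPatterns.foldl (pvStepA celltypes) ([], PySem.Set.empty)).2 ct))
      = celltypes.filter (fun ct => !pvPatterns.any (fun p => PySem.Str.isIn p ct)) := by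
    refine List.filter_congr ?_
    intro ct hct
    have hco : celltypes.contains ct = true := by simpa [List.contains_eq_mem] using hct
    rw [h5 ct, hco, Bool.true_and, List.nil_append]
  rw [hrem]
  set SR := PySem.List.sorted
      (celltypes.filter (fun ct => !pvPatterns.any (fun p => PySem.Str.isIn p ct))) (fun x => x) false with hSR
  have hSRrank : ∀ ct ∈ SR, pvRank ct = pvPatterns.length := by
    intro ct hct
    have : ct ∈ celltypes.filter (fun ct => !pvPatterns.any (fun p => PySem.Str.isIn p ct)) := by
      simpa [hSR, PySem.List.mem_sorted] using hct
    have hno := (List.mem_filter.mp this).2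
    refine rank_of_no_match ?_
    intro p hp
    have := List.any_eq_false.mp (by simpa using hno) p hp
    simpa using this
  rw [alt_eq_sorted]
  refine PySem.List.eq_of_perm_of_pairwise_le_of_injective pvKey pvKey_injective ?_ ?_ ?_
  · -- permutation: both sides are permutations of celltypes
    have hB := PySem.List.sorted_perm celltypes pvKey false
    have htail : tail.Perm (celltypes.filter (fun ct => pvPatterns.any (fun p => PySem.Str.isIn p ct))) := by
      refine h2.trans (by rw [List.filter_congr ?_]; intro ct _; simp)
    have hpart := List.filter_append_perm (fun ct => pvPatterns.any (fun p => PySem.Str.isIn p ct)) celltypes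
    exact List.Perm.trans (List.Perm.trans (List.Perm.append htail (PySem.List.sorted_perm _ _ _)) hpart) hB.symm
  · -- pairwise on A's result
    rw [List.pairwise_append]
    refine ⟨h3, ?_, ?_⟩
    · have hs := PySem.List.sorted_pairwise
        (celltypes.filter (fun ct => !pvPatterns.any (fun p => PySem.Str.isIn p ct))) (fun x => x)
      refine hs.imp_of_mem ?_
      intro a b ha hb hab
      rw [Prod.Lex.le_iff]
      exact Or.inr ⟨by simp [pvKey, hSRrank a ha, hSRrank b hb], by simpa [pvKey] using hab⟩
    · intro a ha b hb
      rw [Prod.Lex.le_iff]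
      refine Or.inl ?_
      simp only [pvKey, ofLex_toLex]
      rw [hSRrank b hb]
      exact (h4 a ha).2
  · exact PySem.List.sorted_pairwise celltypes pvKey
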